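-- pv_equiv track=rewrite | github.com/isakchoe/TIL | algorithm /dfs_bfs/ex_20.py | check_main
-- ===== SOURCE A (Python) =====
-- from itertools import  combinations
-- from _collections import deque
--
-- s_num = 0
--
-- def bfs(arr):
--
--     length = len(arr)
--     q = deque()
--
--     check_list =[]
--
--     dx = [0,0,1,-1]
--     dy = [1,-1,0,0]
--
--     # 큐에 교사 위치 삽입
--     for i in range(length):
--         for e in range(length):
--             if arr[i][e] =="T":
--                 q.append([i,e])
--                 check_list.append([i,e])
--
--
--     while q:
--
--         row, col = q.popleft()
--
--         for i in range(4):
--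
--             nx = row + dx[i]
--             ny = col + dy[i]
--
--             while nx >=0 and ny>=0 and nx <length and ny<length:
--
--                 if arr[nx][ny] != "O":
--                     arr[nx][ny] = "T"
--
--                 if arr[nx][ny] == "O":
--                     break
--
--                 nx = nx + dx[i]
--                 ny = ny + dy[i]
--
--
--     answer = 0
--
--     # 안걸린 학생수 구하기
--     for i in range(length):
--         for e in range(length):
--             if arr[i][e] == "S":
--                 answer += 1
--
--
--     return answer
--
-- def check_main(data):
--
--     blank = []
--
--     n = len(data)
--
--     temp = [[0]*n for _ in range(n)]
--
--     for i in range(n):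
--         for j in range(n):
--             if data[i][j] == "X":
--                 blank.append([i, j])
--
--     choice = list(combinations(blank, 3))
--
--     for i in choice:
--
--         for a in range(n):
--             for b in range(n):
--                 temp[a][b] = data[a][b]
--
--         for loca in i:
--             temp[loca[0]][loca[1]] = "O"
--
--         student = bfs(temp)
--
--         if student == s_num:
--
--             return "YES"
--
--
--     return "NO"
-- ===== SOURCE B (Python) =====
-- from itertools import combinations
--
-- def check_main(data):
--     # NOTE: A's global s_num is 0, so a placement succeeds iff EVERY student is
--     # on some teacher's line of sight (zero students left unseen).
--     n = len(data)
--     students = [(i, j) for i in range(n) for j in range(n) if data[i][j] == "S"]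
--     blank = [(i, j) for i in range(n) for j in range(n) if data[i][j] == "X"]
--
--     def seen(si, sj, walls):
--         # is the student at (si, sj) visible to some teacher? (visibility is
--         # symmetric, so walk from the student until a wall 'O' or the edge)
--         for di, dj in ((0, 1), (0, -1), (1, 0), (-1, 0)):
--             x, y = si + di, sj + dj
--             while 0 <= x < n and 0 <= y < n:
--                 c = "O" if (x, y) in walls else data[x][y]
--                 if c == "T":
--                     return True
--                 if c == "O":
--                     break
--                 x, y = x + di, y + dj
--         return False
--
--     for walls in combinations(blank, 3):
--         if all(seen(si, sj, walls) for si, sj in students):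
--             return "YES"
--     return "NO"
-- ===== Notes on version B (the rewrite author's own statement) =====
-- stated objective: alternative
-- what changed: A copies the grid for each obstacle placement, flood-marks every cell the teachers' rays reach by mutating the copy, then rescans the whole grid counting leftover 'S'; B never builds or mutates a grid: it walks a ray from each student in the four directions (visibility is symmetric) and accepts the placement iff every student's walk meets a 'T' before an 'O' or the edge.
import Mathlib
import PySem

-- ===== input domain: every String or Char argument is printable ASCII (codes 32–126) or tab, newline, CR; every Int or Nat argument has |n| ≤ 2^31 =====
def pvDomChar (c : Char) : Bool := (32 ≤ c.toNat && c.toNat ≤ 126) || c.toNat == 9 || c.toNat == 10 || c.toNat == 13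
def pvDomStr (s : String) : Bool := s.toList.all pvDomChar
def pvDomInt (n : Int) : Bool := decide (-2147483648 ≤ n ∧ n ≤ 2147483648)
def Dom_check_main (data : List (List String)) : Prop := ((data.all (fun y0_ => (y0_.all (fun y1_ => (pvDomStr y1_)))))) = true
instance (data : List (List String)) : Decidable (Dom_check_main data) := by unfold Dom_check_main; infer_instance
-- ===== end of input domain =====

-- B replaces A's flood-mark-the-grid-then-recount simulation by a direct visibility
-- test that walks a ray from each student until it meets a teacher or a wall
-- (objective: simpler; same asymptotic cost).

-- ===== PORT A =====
-- grid access data[i][j] / temp[i][j] (Python raises on a short row; such inputs are outside Pre_)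
def pvGet2 (g : List (List String)) (i j : Nat) : String := (g.getD i []).getD j ""
-- in-place assignment temp[i][j] = v
def pvSet2 (g : List (List String)) (i j : Nat) (v : String) : List (List String) :=
  g.set i ((g.getD i []).set j v)
def pvDx : List Int := [0, 0, 1, -1]
def pvDy : List Int := [1, -1, 0, 0]
-- the inner `while` of bfs; fuel = grid side (the moving coordinate leaves the grid after ≤ len steps,
-- so fuel `len` reproduces the Python loop exactly)
def pvRayA (len : Nat) (dxi dyi : Int) : Nat → Int → Int → List (List String) → List (List String)
  | 0, _, _, g => g
  | f + 1, nx, ny, g =>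
    if 0 ≤ nx ∧ 0 ≤ ny ∧ nx < (len : Int) ∧ ny < (len : Int) then
      let g1 := if pvGet2 g nx.toNat ny.toNat ≠ "O" then pvSet2 g nx.toNat ny.toNat "T" else g
      if pvGet2 g1 nx.toNat ny.toNat = "O" then g1
      else pvRayA len dxi dyi f (nx + dxi) (ny + dyi) g1
    else g
def pvBfs (arr : List (List String)) : Int :=
  let len := arr.length
  let q := (List.range len).flatMap (fun i =>
    (List.range len).filterMap (fun e => if pvGet2 arr i e = "T" then some (i, e) else none))
  let arr2 := q.foldl (fun g rc =>
    (List.range 4).foldl (fun g i =>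
      pvRayA len (pvDx.getD i 0) (pvDy.getD i 0) len ((rc.1 : Int) + pvDx.getD i 0)
        ((rc.2 : Int) + pvDy.getD i 0) g) g) arr
  (List.range len).foldl (fun a i =>
    (List.range len).foldl (fun a e => if pvGet2 arr2 i e = "S" then a + 1 else a) a) (0 : Int)
-- the double scan `for i in range(n): for j in range(n): if data[i][j] == v: append (i, j)`
def pvScan (data : List (List String)) (n : Nat) (v : String) : List (Nat × Nat) :=
  (List.range n).flatMap (fun i =>
    (List.range n).filterMap (fun j => if pvGet2 data i j = v then some (i, j) else none))
-- itertools.combinations(l, 2) / (l, 3) in itertools order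
def pvCombos2 {α : Type} : List α → List (α × α)
  | [] => []
  | x :: xs => (xs.map (fun y => (x, y))) ++ pvCombos2 xs
def pvCombos3 {α : Type} : List α → List (α × α × α)
  | [] => []
  | x :: xs => ((pvCombos2 xs).map (fun p => (x, p.1, p.2))) ++ pvCombos3 xs
-- copy data into temp and place the three obstacles
def pvPlace (data : List (List String)) (n : Nat)
    (c : (Nat × Nat) × (Nat × Nat) × (Nat × Nat)) : List (List String) :=
  let t0 := (List.range n).map (fun _a => (List.range n).map (fun b => pvGet2 data _a b))
  let t1 := pvSet2 t0 c.1.1 c.1.2 "O"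
  let t2 := pvSet2 t1 c.2.1.1 c.2.1.2 "O"
  pvSet2 t2 c.2.2.1 c.2.2.2 "O"
-- `for i in choice: ... if student == s_num: return "YES" ... return "NO"`  (s_num = 0)
def pvLoopA (data : List (List String)) (n : Nat) :
    List ((Nat × Nat) × (Nat × Nat) × (Nat × Nat)) → String
  | [] => "NO"
  | c :: rest => if pvBfs (pvPlace data n c) = 0 then "YES" else pvLoopA data n rest
def check_main (data : List (List String)) : String :=
  pvLoopA data data.length (pvCombos3 (pvScan data data.length "X"))

-- ===== PORT B =====
def pvDirsB : List (Int × Int) := [(0, 1), (0, -1), (1, 0), (-1, 0)]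
-- `"O" if (x, y) in walls else data[x][y]`
def pvCellB (data : List (List String)) (w : (Nat × Nat) × (Nat × Nat) × (Nat × Nat))
    (x y : Nat) : String :=
  if (x, y) = w.1 ∨ (x, y) = w.2.1 ∨ (x, y) = w.2.2 then "O" else pvGet2 data x y
-- the inner `while` of seen; fuel = grid side, same justification as pvRayA
def pvSeenDir (data : List (List String)) (w : (Nat × Nat) × (Nat × Nat) × (Nat × Nat))
    (n : Nat) (di dj : Int) : Nat → Int → Int → Bool
  | 0, _, _ => false
  | f + 1, x, y =>
    if 0 ≤ x ∧ x < (n : Int) ∧ 0 ≤ y ∧ y < (n : Int) then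
      let c := pvCellB data w x.toNat y.toNat
      if c = "T" then true
      else if c = "O" then false
      else pvSeenDir data w n di dj f (x + di) (y + dj)
    else false
def pvSeen (data : List (List String)) (w : (Nat × Nat) × (Nat × Nat) × (Nat × Nat))
    (n : Nat) (s : Nat × Nat) : Bool :=
  pvDirsB.any (fun d => pvSeenDir data w n d.1 d.2 n ((s.1 : Int) + d.1) ((s.2 : Int) + d.2))
def pvLoopB (data : List (List String)) (n : Nat) (students : List (Nat × Nat)) :
    List ((Nat × Nat) × (Nat × Nat) × (Nat × Nat)) → String
  | [] => "NO"
  | w :: rest =>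
    if students.all (fun s => pvSeen data w n s) then "YES" else pvLoopB data n students rest
def check_main_alt (data : List (List String)) : String :=
  pvLoopB data data.length (pvScan data data.length "S")
    (pvCombos3 (pvScan data data.length "X"))

-- ===== PRECONDITION & SPEC =====
-- Pre_ excludes exactly the ragged grids on which Python A raises IndexError:
-- A indexes data[i][j] for all i, j < len(data), so every row must have at least len(data) entries.
def Pre_check_main (data : List (List String)) : Prop :=
  ∀ row ∈ data, data.length ≤ row.length
instance (data : List (List String)) : Decidable (Pre_check_main data) := by
  unfold Pre_check_main; infer_instance
def pvWitness_check_main : List (List String) :=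
  [["T", "X", "X"], ["X", "S", "X"], ["X", "X", "X"]]
def Spec_check_main (data : List (List String)) (out : String) : Prop := out = check_main_alt data
instance (data : List (List String)) (out : String) : Decidable (Spec_check_main data out) := by
  unfold Spec_check_main; infer_instance

-- ===== CLAIM (what is proved, stated in full; the proofs are below) =====
def Claim_equal_check_main : Prop := ∀ (data : List (List String)), Dom_check_main data → Pre_check_main data → Spec_check_main data (check_main data)

-- ===== LEMMAS AND PROOFS =====

-- row extraction of an assignment
lemma pvSet2_row (g : List (List String)) (i j : Nat) (v : String) (a : Nat) :
    (pvSet2 g i j v).getD a [] =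
      if i = a ∧ i < g.length then (g.getD i []).set j v else g.getD a [] := by
  unfold pvSet2
  rcases Nat.lt_or_ge i g.length with h2 | h2
  · by_cases h : i = a
    · subst h
      rw [if_pos ⟨rfl, h2⟩, List.getD_eq_getElem?_getD, List.getElem?_set,
        if_pos rfl, if_pos h2]
      rfl
    · rw [if_neg (by tauto), List.getD_eq_getElem?_getD, List.getElem?_set,
        if_neg h, ← List.getD_eq_getElem?_getD]
  · have hset : g.set i ((g.getD i []).set j v) = g := List.set_eq_of_length_le h2
    rw [hset, if_neg (by omega)]

lemma pvGet2_set2_ne (g : List (List String)) (i j a b : Nat) (v : String)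
    (h : ¬(a = i ∧ b = j)) : pvGet2 (pvSet2 g i j v) a b = pvGet2 g a b := by
  show ((pvSet2 g i j v).getD a []).getD b "" = (g.getD a []).getD b ""
  rw [pvSet2_row]
  by_cases hia : i = a
  · subst hia
    by_cases h2 : i < g.length
    · have hbj : ¬(j = b) := by tauto
      rw [if_pos ⟨rfl, h2⟩, List.getD_eq_getElem?_getD, List.getElem?_set,
        if_neg hbj, ← List.getD_eq_getElem?_getD]
    · simp [h2]
  · simp [hia]

lemma pvGet2_set2_eq (g : List (List String)) (i j : Nat) (v : String)
    (hi : i < g.length) (hj : j < (g.getD i []).length) :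
    pvGet2 (pvSet2 g i j v) i j = v := by
  show ((pvSet2 g i j v).getD i []).getD j "" = v
  rw [pvSet2_row, if_pos (And.intro rfl hi), List.getD_eq_getElem?_getD,
    List.getElem?_set, if_pos rfl, if_pos hj]
  rfl

-- grid shape: an n x n list of lists
def pvDims (n : Nat) (g : List (List String)) : Prop :=
  g.length = n ∧ ∀ i, i < n → (g.getD i []).length = n

lemma pvDims_set2 {n : Nat} {g : List (List String)} (hg : pvDims n g) (i j : Nat) (v : String) :
    pvDims n (pvSet2 g i j v) := by
  obtain ⟨h1, h2⟩ := hg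
  constructor
  · simpa [pvSet2] using h1
  · intro a ha
    rw [pvSet2_row]
    split_ifs with h
    · rw [List.length_set]; exact h2 i (by omega)
    · exact h2 a ha

-- a convenient combined form (needs the grid shape)
lemma pvGet2_set2 {n : Nat} {g : List (List String)} (hg : pvDims n g) (i j a b : Nat)
    (v : String) (hi : i < n) (hj : j < n) :
    pvGet2 (pvSet2 g i j v) a b = if (a, b) = (i, j) then v else pvGet2 g a b := by
  by_cases h : (a, b) = (i, j)
  · obtain ⟨rfl, rfl⟩ := Prod.mk.inj h
    rw [if_pos rfl]
    exact pvGet2_set2_eq g a b v (by rw [hg.1]; exact hi) (by rw [hg.2 a hi]; exact hj)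
  · rw [if_neg h]
    exact pvGet2_set2_ne g i j a b v (fun hh => h (by rw [hh.1, hh.2]))

-- the copied grid
lemma pvCopyRow (data : List (List String)) (n a : Nat) :
    (((List.range n).map (fun a => (List.range n).map (fun b => pvGet2 data a b))).getD a [])
      = if a < n then (List.range n).map (fun b => pvGet2 data a b) else [] := by
  rw [List.getD_eq_getElem?_getD]
  by_cases ha : a < n
  · rw [List.getElem?_map, List.getElem?_range ha]
    simp [ha]
  · rw [List.getElem?_eq_none (by simpa using (by omega : n ≤ a))]
    simp [ha]

lemma pvDims_copy (data : List (List String)) (n : Nat) :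
    pvDims n ((List.range n).map (fun a => (List.range n).map (fun b => pvGet2 data a b))) := by
  constructor
  · simp
  · intro i hi
    rw [pvCopyRow, if_pos hi]
    simp

lemma pvGet2_copy (data : List (List String)) (n a b : Nat) (ha : a < n) (hb : b < n) :
    pvGet2 ((List.range n).map (fun a => (List.range n).map (fun b => pvGet2 data a b))) a b
      = pvGet2 data a b := by
  show (_root_.id (((List.range n).map _).getD a [])).getD b "" = _
  rw [_root_.id, pvCopyRow, if_pos ha, List.getD_eq_getElem?_getD,
    List.getElem?_map, List.getElem?_range hb]
  rfl

lemma pvDims_place (data : List (List String)) (n : Nat)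
    (c : (Nat × Nat) × (Nat × Nat) × (Nat × Nat)) : pvDims n (pvPlace data n c) :=
  pvDims_set2 (pvDims_set2 (pvDims_set2 (pvDims_copy data n) _ _ _) _ _ _) _ _ _

-- combo components are in-range grid cells holding "X" in data
def pvGood (data : List (List String)) (n : Nat)
    (c : (Nat × Nat) × (Nat × Nat) × (Nat × Nat)) : Prop :=
  (c.1.1 < n ∧ c.1.2 < n ∧ pvGet2 data c.1.1 c.1.2 = "X") ∧
  (c.2.1.1 < n ∧ c.2.1.2 < n ∧ pvGet2 data c.2.1.1 c.2.1.2 = "X") ∧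
  (c.2.2.1 < n ∧ c.2.2.2 < n ∧ pvGet2 data c.2.2.1 c.2.2.2 = "X")

-- the placed grid seen through pvGet2 is exactly B's cell function
lemma pvGet2_place (data : List (List String)) (n : Nat)
    (c : (Nat × Nat) × (Nat × Nat) × (Nat × Nat)) (hc : pvGood data n c)
    (a b : Nat) (ha : a < n) (hb : b < n) :
    pvGet2 (pvPlace data n c) a b = pvCellB data c a b := by
  obtain ⟨⟨c1i, c1j⟩, ⟨c2i, c2j⟩, c3i, c3j⟩ := c
  obtain ⟨⟨k1, l1, _⟩, ⟨k2, l2, _⟩, k3, l3, _⟩ := hc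
  have d0 := pvDims_copy data n
  have d1 := pvDims_set2 d0 c1i c1j "O"
  have d2 := pvDims_set2 d1 c2i c2j "O"
  show pvGet2 (pvSet2 (pvSet2 (pvSet2 _ c1i c1j "O") c2i c2j "O") c3i c3j "O") a b = _
  rw [pvGet2_set2 d2 c3i c3j a b "O" k3 l3, pvGet2_set2 d1 c2i c2j a b "O" k2 l2,
    pvGet2_set2 d0 c1i c1j a b "O" k1 l1]
  unfold pvCellB
  by_cases h3 : (a, b) = (c3i, c3j) <;> by_cases h2 : (a, b) = (c2i, c2j) <;>
    by_cases h1 : (a, b) = (c1i, c1j) <;>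
    simp [h1, h2, h3, pvGet2_copy data n a b ha hb]

-- marking a list of cells "T"
def pvMark (g : List (List String)) (ps : List (Nat × Nat)) : List (List String) :=
  ps.foldl (fun h p => pvSet2 h p.1 p.2 "T") g

lemma pvMark_append (g : List (List String)) (ps qs : List (Nat × Nat)) :
    pvMark g (ps ++ qs) = pvMark (pvMark g ps) qs := by
  unfold pvMark; exact List.foldl_append

lemma pvDims_mark {n : Nat} : ∀ (ps : List (Nat × Nat)) (g : List (List String)),
    pvDims n g → pvDims n (pvMark g ps)
  | [], _, hg => hg
  | _ :: ps, _, hg => pvDims_mark ps _ (pvDims_set2 hg _ _ _)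

lemma pvGet2_mark {n : Nat} : ∀ (ps : List (Nat × Nat)) (g : List (List String)),
    pvDims n g → (∀ p ∈ ps, p.1 < n ∧ p.2 < n) →
    ∀ a b, a < n → b < n →
    pvGet2 (pvMark g ps) a b = if (a, b) ∈ ps then "T" else pvGet2 g a b := by
  intro ps
  induction ps with
  | nil => intro g _ _ a b _ _; simp [pvMark]
  | cons p ps ih =>
    intro g hg hps a b ha hb
    have hstep : pvMark g (p :: ps) = pvMark (pvSet2 g p.1 p.2 "T") ps := rfl
    rw [hstep, ih _ (pvDims_set2 hg _ _ _) (fun q hq => hps q (by simp [hq])) a b ha hb,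
      pvGet2_set2 hg p.1 p.2 a b "T" (hps p (by simp)).1 (hps p (by simp)).2]
    by_cases hmem : (a, b) ∈ ps
    · simp [hmem]
    · by_cases hp : (a, b) = (p.1, p.2)
      · simp [hp]
      · have : ¬ (a, b) = p := by cases p; exact hp
        simp [hmem, hp]

-- the cells a single ray of A visits (and marks), read off the unmutated cell function C
def pvVis (C : Nat → Nat → String) (n : Nat) (di dj : Int) : Nat → Int → Int → List (Nat × Nat)
  | 0, _, _ => []
  | f + 1, x, y =>
    if 0 ≤ x ∧ 0 ≤ y ∧ x < (n : Int) ∧ y < (n : Int) then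
      if C x.toNat y.toNat = "O" then []
      else (x.toNat, y.toNat) :: pvVis C n di dj f (x + di) (y + dj)
    else []

-- in-range non-"O" cells
def pvOK (C : Nat → Nat → String) (n : Nat) (ps : List (Nat × Nat)) : Prop :=
  ∀ p ∈ ps, p.1 < n ∧ p.2 < n ∧ C p.1 p.2 ≠ "O"

lemma pvOK_append {C : Nat → Nat → String} {n : Nat} {ps qs : List (Nat × Nat)}
    (h1 : pvOK C n ps) (h2 : pvOK C n qs) : pvOK C n (ps ++ qs) := by
  intro p hp
  rcases List.mem_append.1 hp with h | h
  · exact h1 p h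
  · exact h2 p h

lemma pvVis_ok (C : Nat → Nat → String) (n : Nat) (di dj : Int) :
    ∀ (f : Nat) (x y : Int), pvOK C n (pvVis C n di dj f x y) := by
  intro f
  induction f with
  | zero => intro x y p hp; simp [pvVis] at hp
  | succ f ih =>
    intro x y p hp
    rw [pvVis] at hp
    split_ifs at hp with h1 h2
    · simp at hp
    · rcases List.mem_cons.1 hp with rfl | hmem
      · exact ⟨by omega, by omega, h2⟩
      · exact ih _ _ p hmem
    · simp at hp

-- one ray of A, acting on a partially marked grid, marks exactly its pvVis cells
lemma pvRayA_mark (n : Nat) (di dj : Int) (C : Nat → Nat → String) (g : List (List String))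
    (hg : pvDims n g) (hCg : ∀ a b, a < n → b < n → pvGet2 g a b = C a b) :
    ∀ (f : Nat) (x y : Int) (ps : List (Nat × Nat)), pvOK C n ps →
      pvRayA n di dj f x y (pvMark g ps) = pvMark g (ps ++ pvVis C n di dj f x y) := by
  intro f
  induction f with
  | zero => intro x y ps _; simp [pvRayA, pvVis]
  | succ f ih =>
    intro x y ps hps
    rw [pvRayA, pvVis]
    by_cases hr : 0 ≤ x ∧ 0 ≤ y ∧ x < (n : Int) ∧ y < (n : Int)
    · rw [if_pos hr, if_pos hr]
      have hx : x.toNat < n := by omega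
      have hy : y.toNat < n := by omega
      have hcell : pvGet2 (pvMark g ps) x.toNat y.toNat =
          if (x.toNat, y.toNat) ∈ ps then "T" else C x.toNat y.toNat := by
        rw [pvGet2_mark ps g hg (fun p hp => ⟨(hps p hp).1, (hps p hp).2.1⟩) _ _ hx hy]
        split_ifs with h
        · rfl
        · exact hCg _ _ hx hy
      by_cases hO : C x.toNat y.toNat = "O"
      · have hnot : (x.toNat, y.toNat) ∉ ps := fun h => (hps _ h).2.2 hO
        rw [if_pos hO]
        have hcO : pvGet2 (pvMark g ps) x.toNat y.toNat = "O" := by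
          rw [hcell, if_neg hnot]; exact hO
        simp only [hcO, ne_eq, not_true_eq_false, if_false]
        simp
      · rw [if_neg hO]
        have hps' : pvOK C n (ps ++ [(x.toNat, y.toNat)]) :=
          pvOK_append hps (by intro p hp; simp at hp; subst hp; exact ⟨hx, hy, hO⟩)
        have hne : pvGet2 (pvMark g ps) x.toNat y.toNat ≠ "O" := by
          rw [hcell]; split_ifs with h
          · decide
          · exact hO
        have hset : pvSet2 (pvMark g ps) x.toNat y.toNat "T"
            = pvMark g (ps ++ [(x.toNat, y.toNat)]) := by
          rw [pvMark_append]; rfl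
        have hT : pvGet2 (pvMark g (ps ++ [(x.toNat, y.toNat)])) x.toNat y.toNat = "T" := by
          rw [pvGet2_mark _ g hg (fun p hp => ⟨(hps' p hp).1, (hps' p hp).2.1⟩) _ _ hx hy]
          simp
        simp only [hne, if_true, ne_eq, not_false_eq_true, hset, hT]
        rw [if_neg (by decide : ¬ ("T" : String) = "O")]
        rw [ih (x + di) (y + dj) (ps ++ [(x.toNat, y.toNat)]) hps']
        simp
    · rw [if_neg hr, if_neg hr]
      simp
-- congruence helpers
lemma pvFilterMapCongr {α β : Type} (f g : α → Option β) :
    ∀ l : List α, (∀ a ∈ l, f a = g a) → l.filterMap f = l.filterMap g := by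
  intro l
  induction l with
  | nil => intro _; rfl
  | cons a l ih =>
    intro h
    rw [List.filterMap_cons, List.filterMap_cons, h a (by simp),
      ih (fun b hb => h b (by simp [hb]))]

lemma pvFlatMapCongr {α β : Type} (f g : α → List β) :
    ∀ l : List α, (∀ a ∈ l, f a = g a) → l.flatMap f = l.flatMap g := by
  intro l
  induction l with
  | nil => intro _; rfl
  | cons a l ih =>
    intro h
    rw [List.flatMap_cons, List.flatMap_cons, h a (by simp),
      ih (fun b hb => h b (by simp [hb]))]

-- the double grid scan, abstract over the cell function
lemma pvScanC (C : Nat → Nat → String) (n : Nat) (v : String) (p : Nat × Nat) :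
    (p ∈ (List.range n).flatMap (fun i =>
        (List.range n).filterMap (fun e => if C i e = v then some (i, e) else none))
      ↔ p.1 < n ∧ p.2 < n ∧ C p.1 p.2 = v) := by
  obtain ⟨a, b⟩ := p
  rw [List.mem_flatMap]
  constructor
  · rintro ⟨i, hi, hmem⟩
    rw [List.mem_filterMap] at hmem
    obtain ⟨e, he, hif⟩ := hmem
    split_ifs at hif with hc
    · obtain ⟨rfl, rfl⟩ := Prod.mk.inj (Option.some.inj hif)
      exact ⟨List.mem_range.1 hi, List.mem_range.1 he, hc⟩
  · rintro ⟨ha, hb, hv⟩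
    exact ⟨a, List.mem_range.2 ha, by
      rw [List.mem_filterMap]
      exact ⟨b, List.mem_range.2 hb, by rw [if_pos hv]⟩⟩

lemma pvScan_mem (data : List (List String)) (n : Nat) (v : String) (p : Nat × Nat) :
    p ∈ pvScan data n v ↔ p.1 < n ∧ p.2 < n ∧ pvGet2 data p.1 p.2 = v := by
  unfold pvScan
  exact pvScanC (fun a b => pvGet2 data a b) n v p

-- teachers of the cell function C
def pvTeach (C : Nat → Nat → String) (n : Nat) : List (Nat × Nat) :=
  (List.range n).flatMap (fun i =>
    (List.range n).filterMap (fun e => if C i e = "T" then some (i, e) else none))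

-- all cells visited by some teacher's ray
def pvAll (C : Nat → Nat → String) (n : Nat) : List (Nat × Nat) :=
  (pvTeach C n).flatMap (fun t =>
    pvDirsB.flatMap (fun d => pvVis C n d.1 d.2 n ((t.1 : Int) + d.1) ((t.2 : Int) + d.2)))

lemma pvAll_ok (C : Nat → Nat → String) (n : Nat) : pvOK C n (pvAll C n) := by
  intro p hp
  rw [pvAll, List.mem_flatMap] at hp
  obtain ⟨t, _, hp⟩ := hp
  rw [List.mem_flatMap] at hp
  obtain ⟨d, _, hp⟩ := hp
  exact pvVis_ok C n d.1 d.2 n _ _ p hp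

-- the four directions of A, unfolded
lemma pvRay4_mark (n : Nat) (C : Nat → Nat → String) (g : List (List String))
    (hg : pvDims n g) (hCg : ∀ a b, a < n → b < n → pvGet2 g a b = C a b)
    (t : Nat × Nat) (ps : List (Nat × Nat)) (hps : pvOK C n ps) :
    (List.range 4).foldl (fun h i =>
        pvRayA n (pvDx.getD i 0) (pvDy.getD i 0) n ((t.1 : Int) + pvDx.getD i 0)
          ((t.2 : Int) + pvDy.getD i 0) h) (pvMark g ps)
      = pvMark g (ps ++ pvDirsB.flatMap (fun d =>
          pvVis C n d.1 d.2 n ((t.1 : Int) + d.1) ((t.2 : Int) + d.2))) := by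
  have h4 : (List.range 4) = [0, 1, 2, 3] := by decide
  rw [h4]
  simp only [List.foldl_cons, List.foldl_nil]
  have e0 : pvDx.getD 0 0 = 0 := rfl
  have e0' : pvDy.getD 0 0 = 1 := rfl
  have e1 : pvDx.getD 1 0 = 0 := rfl
  have e1' : pvDy.getD 1 0 = -1 := rfl
  have e2 : pvDx.getD 2 0 = 1 := rfl
  have e2' : pvDy.getD 2 0 = 0 := rfl
  have e3 : pvDx.getD 3 0 = -1 := rfl
  have e3' : pvDy.getD 3 0 = 0 := rfl
  rw [e0, e0', e1, e1', e2, e2', e3, e3']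
  have v1 := pvVis_ok C n 0 1 n ((t.1 : Int) + 0) ((t.2 : Int) + 1)
  have v2 := pvVis_ok C n 0 (-1) n ((t.1 : Int) + 0) ((t.2 : Int) + -1)
  have v3 := pvVis_ok C n 1 0 n ((t.1 : Int) + 1) ((t.2 : Int) + 0)
  have v4 := pvVis_ok C n (-1) 0 n ((t.1 : Int) + -1) ((t.2 : Int) + 0)
  rw [pvRayA_mark n 0 1 C g hg hCg n _ _ ps hps,
    pvRayA_mark n 0 (-1) C g hg hCg n _ _ _ (pvOK_append hps v1),
    pvRayA_mark n 1 0 C g hg hCg n _ _ _ (pvOK_append (pvOK_append hps v1) v2),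
    pvRayA_mark n (-1) 0 C g hg hCg n _ _ _
      (pvOK_append (pvOK_append (pvOK_append hps v1) v2) v3)]
  simp [pvDirsB, List.append_assoc]

-- the whole bfs marking phase
lemma pvFold_mark (n : Nat) (C : Nat → Nat → String) (g : List (List String))
    (hg : pvDims n g) (hCg : ∀ a b, a < n → b < n → pvGet2 g a b = C a b) :
    ∀ (q : List (Nat × Nat)) (ps : List (Nat × Nat)), pvOK C n ps →
      q.foldl (fun h rc =>
          (List.range 4).foldl (fun h i =>
            pvRayA n (pvDx.getD i 0) (pvDy.getD i 0) n ((rc.1 : Int) + pvDx.getD i 0)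
              ((rc.2 : Int) + pvDy.getD i 0) h) h) (pvMark g ps)
        = pvMark g (ps ++ q.flatMap (fun t =>
            pvDirsB.flatMap (fun d =>
              pvVis C n d.1 d.2 n ((t.1 : Int) + d.1) ((t.2 : Int) + d.2)))) := by
  intro q
  induction q with
  | nil => intro ps _; simp
  | cons t q ih =>
    intro ps hps
    rw [List.foldl_cons, pvRay4_mark n C g hg hCg t ps hps]
    have hok : pvOK C n (ps ++ pvDirsB.flatMap (fun d =>
        pvVis C n d.1 d.2 n ((t.1 : Int) + d.1) ((t.2 : Int) + d.2))) := by
      refine pvOK_append hps ?_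
      intro p hp
      rw [List.mem_flatMap] at hp
      obtain ⟨d, _, hp⟩ := hp
      exact pvVis_ok C n d.1 d.2 n _ _ p hp
    rw [ih _ hok]
    simp [List.flatMap_cons, List.append_assoc]

-- counting loops
lemma pvFoldMono {α : Type} (F : Int → α → Int) (hm : ∀ a i, 0 ≤ a → 0 ≤ F a i) :
    ∀ (l : List α) (a : Int), 0 ≤ a → 0 ≤ l.foldl F a := by
  intro l
  induction l with
  | nil => intro a ha; simpa using ha
  | cons i l ih => intro a ha; rw [List.foldl_cons]; exact ih _ (hm a i ha)

lemma pvFoldZero {α : Type} (F : Int → α → Int) (Q : α → Prop)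
    (hm : ∀ a i, 0 ≤ a → 0 ≤ F a i)
    (hz : ∀ a i, 0 ≤ a → (F a i = 0 ↔ a = 0 ∧ Q i)) :
    ∀ (l : List α) (a : Int), 0 ≤ a → (l.foldl F a = 0 ↔ a = 0 ∧ ∀ i ∈ l, Q i) := by
  intro l
  induction l with
  | nil => intro a _; simp
  | cons i l ih =>
    intro a ha
    rw [List.foldl_cons, ih _ (hm a i ha), hz a i ha]
    constructor
    · rintro ⟨⟨h1, h2⟩, h3⟩
      exact ⟨h1, by intro j hj; rcases List.mem_cons.1 hj with rfl | hj
                    · exact h2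
                    · exact h3 j hj⟩
    · rintro ⟨h1, h2⟩
      exact ⟨⟨h1, h2 i (by simp)⟩, fun j hj => h2 j (by simp [hj])⟩

-- bfs computes: number of "S" cells never visited; it is 0 iff every "S" cell is visited
lemma pvBfs_char (n : Nat) (C : Nat → Nat → String) (g : List (List String))
    (hg : pvDims n g) (hCg : ∀ a b, a < n → b < n → pvGet2 g a b = C a b) :
    (pvBfs g = 0 ↔ ∀ a b, a < n → b < n → C a b = "S" → (a, b) ∈ pvAll C n) := by
  have hlen : g.length = n := hg.1
  simp only [pvBfs]
  rw [hlen]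
  have hq : (List.range n).flatMap (fun i =>
      (List.range n).filterMap (fun e => if pvGet2 g i e = "T" then some (i, e) else none))
      = pvTeach C n := by
    unfold pvTeach
    refine pvFlatMapCongr _ _ _ (fun i hi => ?_)
    refine pvFilterMapCongr _ _ _ (fun e he => ?_)
    rw [hCg i e (List.mem_range.1 hi) (List.mem_range.1 he)]
  rw [hq]
  have hfold := pvFold_mark n C g hg hCg (pvTeach C n) [] (by intro p hp; simp at hp)
  have hnil : pvMark g ([] : List (Nat × Nat)) = g := rfl
  rw [hnil] at hfold
  rw [hfold]
  have harr2 : ∀ a b, a < n → b < n →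
      pvGet2 (pvMark g ([] ++ pvAll C n)) a b = if (a, b) ∈ pvAll C n then "T" else C a b := by
    intro a b ha hb
    rw [List.nil_append,
      pvGet2_mark _ g hg (fun p hp => ⟨(pvAll_ok C n p hp).1, (pvAll_ok C n p hp).2.1⟩) a b ha hb]
    split_ifs with h
    · rfl
    · exact hCg a b ha hb
  rw [pvFoldZero _ (fun i => ∀ e ∈ List.range n, ¬ pvGet2 (pvMark g ([] ++ pvAll C n)) i e = "S")
    (fun a i ha => pvFoldMono _ (fun a e ha => by split_ifs <;> omega) _ _ ha)
    (fun a i ha => pvFoldZero _ (fun e => ¬ pvGet2 (pvMark g ([] ++ pvAll C n)) i e = "S")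
      (fun a e ha => by split_ifs <;> omega)
      (fun a e ha => by
        split_ifs with h
        · constructor
          · intro hh; exact absurd hh (by omega)
          · rintro ⟨_, hP⟩; exact absurd h hP
        · constructor
          · intro hh; exact ⟨hh, h⟩
          · rintro ⟨hh, _⟩; exact hh) _ a ha) _ _ le_rfl]
  constructor
  · rintro ⟨_, h⟩ a b ha hb hS
    have := h a (List.mem_range.2 ha) b (List.mem_range.2 hb)
    rw [harr2 a b ha hb] at this
    by_cases hmem : (a, b) ∈ pvAll C n
    · exact hmem
    · rw [if_neg hmem] at this; exact absurd hS this
  · intro h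
    refine ⟨rfl, fun a hamem b hbmem => ?_⟩
    have ha := List.mem_range.1 hamem
    have hb := List.mem_range.1 hbmem
    rw [harr2 a b ha hb]
    split_ifs with hmem
    · decide
    · intro hS
      exact hmem (h a b ha hb hS)
-- B's ray walk, abstract over the cell function
def pvHit (C : Nat → Nat → String) (n : Nat) (di dj : Int) : Nat → Int → Int → Bool
  | 0, _, _ => false
  | f + 1, x, y =>
    if 0 ≤ x ∧ x < (n : Int) ∧ 0 ≤ y ∧ y < (n : Int) then
      if C x.toNat y.toNat = "T" then true
      else if C x.toNat y.toNat = "O" then false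
      else pvHit C n di dj f (x + di) (y + dj)
    else false

lemma pvSeenDir_eq (data : List (List String)) (w : (Nat × Nat) × (Nat × Nat) × (Nat × Nat))
    (n : Nat) (di dj : Int) : ∀ (f : Nat) (x y : Int),
    pvSeenDir data w n di dj f x y = pvHit (pvCellB data w) n di dj f x y := by
  intro f
  induction f with
  | zero => intro x y; rfl
  | succ f ih =>
    intro x y
    rw [pvSeenDir, pvHit]
    by_cases hr : 0 ≤ x ∧ x < (n : Int) ∧ 0 ≤ y ∧ y < (n : Int)
    · rw [if_pos hr, if_pos hr]
      show (if pvCellB data w x.toNat y.toNat = "T" then true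
        else if pvCellB data w x.toNat y.toNat = "O" then false
        else pvSeenDir data w n di dj f (x + di) (y + dj)) = _
      rw [ih]
    · rw [if_neg hr, if_neg hr]

-- positions along a ray
def pvPos (x y di dj : Int) (j : Nat) : Int × Int := (x + (j : Int) * di, y + (j : Int) * dj)
def pvInR (n : Nat) (q : Int × Int) : Prop :=
  0 ≤ q.1 ∧ 0 ≤ q.2 ∧ q.1 < (n : Int) ∧ q.2 < (n : Int)

lemma pvPos_zero (x y di dj : Int) : pvPos x y di dj 0 = (x, y) := by simp [pvPos]
lemma pvPos_succ (x y di dj : Int) (j : Nat) :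
    pvPos (x + di) (y + dj) di dj j = pvPos x y di dj (j + 1) := by
  unfold pvPos
  rw [Prod.mk.injEq]
  constructor <;> · push_cast; ring

lemma pvHit_iff (C : Nat → Nat → String) (n : Nat) (di dj : Int) : ∀ (f : Nat) (x y : Int),
    (pvHit C n di dj f x y = true ↔
      ∃ k, k < f ∧ (∀ j, j ≤ k → pvInR n (pvPos x y di dj j)) ∧
        (∀ j, j < k → C (pvPos x y di dj j).1.toNat (pvPos x y di dj j).2.toNat ≠ "O") ∧
        C (pvPos x y di dj k).1.toNat (pvPos x y di dj k).2.toNat = "T") := by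
  intro f
  induction f with
  | zero => intro x y; simp [pvHit]
  | succ f ih =>
    intro x y
    rw [pvHit]
    by_cases hr : 0 ≤ x ∧ x < (n : Int) ∧ 0 ≤ y ∧ y < (n : Int)
    · rw [if_pos hr]
      have hr' : pvInR n (pvPos x y di dj 0) := by
        rw [pvPos_zero]; exact ⟨hr.1, hr.2.2.1, hr.2.1, hr.2.2.2⟩
      by_cases hT : C x.toNat y.toNat = "T"
      · rw [if_pos hT]
        constructor
        · intro _
          refine ⟨0, by omega, ?_, ?_, ?_⟩
          · intro j hj; have : j = 0 := by omega
            subst this; exact hr'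
          · intro j hj; omega
          · rw [pvPos_zero]; exact hT
        · intro _; rfl
      · rw [if_neg hT]
        by_cases hO : C x.toNat y.toNat = "O"
        · rw [if_pos hO]
          constructor
          · intro h; simp at h
          · rintro ⟨k, _, _, hnonO, hT'⟩
            exfalso
            rcases Nat.eq_zero_or_pos k with h0 | hpos
            · subst h0; rw [pvPos_zero] at hT'; exact hT hT'
            · exact hnonO 0 (by omega) (by rw [pvPos_zero]; exact hO)
        · rw [if_neg hO, ih (x + di) (y + dj)]
          constructor
          · rintro ⟨k, hk, hIn, hnonO, hT'⟩
            refine ⟨k + 1, by omega, ?_, ?_, ?_⟩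
            · intro j hj
              cases j with
              | zero => exact hr'
              | succ j' => rw [← pvPos_succ]; exact hIn j' (by omega)
            · intro j hj
              cases j with
              | zero => rw [pvPos_zero]; exact hO
              | succ j' => rw [← pvPos_succ]; exact hnonO j' (by omega)
            · rw [← pvPos_succ]; exact hT'
          · rintro ⟨k, hk, hIn, hnonO, hT'⟩
            cases k with
            | zero => rw [pvPos_zero] at hT'; exact absurd hT' hT
            | succ k' =>
              refine ⟨k', by omega, ?_, ?_, ?_⟩
              · intro j hj; rw [pvPos_succ]; exact hIn (j + 1) (by omega)
              · intro j hj; rw [pvPos_succ]; exact hnonO (j + 1) (by omega)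
              · rw [pvPos_succ]; exact hT'
    · rw [if_neg hr]
      constructor
      · intro h; simp at h
      · rintro ⟨k, _, hIn, _, _⟩
        exfalso
        have := hIn 0 (by omega)
        rw [pvPos_zero] at this
        exact hr ⟨this.1, this.2.2.1, this.2.1, this.2.2.2⟩

lemma pvVis_mem_iff (C : Nat → Nat → String) (n : Nat) (di dj : Int) :
    ∀ (f : Nat) (x y : Int) (a b : Nat),
    ((a, b) ∈ pvVis C n di dj f x y ↔
      ∃ k, k < f ∧ (∀ j, j ≤ k → pvInR n (pvPos x y di dj j)) ∧
        (∀ j, j ≤ k → C (pvPos x y di dj j).1.toNat (pvPos x y di dj j).2.toNat ≠ "O") ∧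
        ((a : Int), (b : Int)) = pvPos x y di dj k) := by
  intro f
  induction f with
  | zero => intro x y a b; simp [pvVis]
  | succ f ih =>
    intro x y a b
    rw [pvVis]
    by_cases hr : 0 ≤ x ∧ 0 ≤ y ∧ x < (n : Int) ∧ y < (n : Int)
    · rw [if_pos hr]
      have hr' : pvInR n (pvPos x y di dj 0) := by
        rw [pvPos_zero]; exact ⟨hr.1, hr.2.1, hr.2.2.1, hr.2.2.2⟩
      by_cases hO : C x.toNat y.toNat = "O"
      · rw [if_pos hO]
        simp only [List.not_mem_nil, false_iff]
        rintro ⟨k, _, _, hnonO, _⟩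
        exact hnonO 0 (by omega) (by rw [pvPos_zero]; exact hO)
      · rw [if_neg hO, List.mem_cons]
        constructor
        · rintro (heq | hmem)
          · obtain ⟨h1, h2⟩ := Prod.mk.inj heq
            refine ⟨0, by omega, ?_, ?_, ?_⟩
            · intro j hj; have : j = 0 := by omega
              subst this; exact hr'
            · intro j hj; have : j = 0 := by omega
              subst this; rw [pvPos_zero]; exact hO
            · rw [pvPos_zero, Prod.mk.injEq]
              constructor <;> omega
          · rw [ih] at hmem
            obtain ⟨k, hk, hIn, hnonO, hpos⟩ := hmem
            refine ⟨k + 1, by omega, ?_, ?_, ?_⟩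
            · intro j hj
              cases j with
              | zero => exact hr'
              | succ j' => rw [← pvPos_succ]; exact hIn j' (by omega)
            · intro j hj
              cases j with
              | zero => rw [pvPos_zero]; exact hO
              | succ j' => rw [← pvPos_succ]; exact hnonO j' (by omega)
            · rw [← pvPos_succ]; exact hpos
        · rintro ⟨k, hk, hIn, hnonO, hpos⟩
          cases k with
          | zero =>
            left
            rw [pvPos_zero] at hpos
            obtain ⟨h1, h2⟩ := Prod.mk.inj hpos
            rw [Prod.mk.injEq]
            constructor <;> omega
          | succ k' =>
            right
            rw [ih]
            refine ⟨k', by omega, fun j hj => by rw [pvPos_succ]; exact hIn (j + 1) (by omega),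
              fun j hj => by rw [pvPos_succ]; exact hnonO (j + 1) (by omega),
              by rw [pvPos_succ]; exact hpos⟩
    · rw [if_neg hr]
      simp only [List.not_mem_nil, false_iff]
      rintro ⟨k, _, hIn, _, _⟩
      have := hIn 0 (by omega)
      rw [pvPos_zero] at this
      exact hr ⟨this.1, this.2.1, this.2.2.1, this.2.2.2⟩

-- the symmetry of line-of-sight: a teacher's forward ray reaches the cell (si, sj)
-- iff the reversed ray from (si, sj) meets a teacher
lemma pvBridge (C : Nat → Nat → String) (n : Nat) (di dj ei ej : Int)
    (hie : di + ei = 0) (hje : dj + ej = 0) (si sj : Nat) (hsi : si < n) (hsj : sj < n)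
    (hs : C si sj ≠ "O") :
    ((∃ t : Nat × Nat, t.1 < n ∧ t.2 < n ∧ C t.1 t.2 = "T" ∧
        (si, sj) ∈ pvVis C n di dj n ((t.1 : Int) + di) ((t.2 : Int) + dj)) ↔
      pvHit C n ei ej n ((si : Int) + ei) ((sj : Int) + ej) = true) := by
  rw [pvHit_iff]
  constructor
  · rintro ⟨⟨tx, ty⟩, htx, hty, hT, hmem⟩
    rw [pvVis_mem_iff] at hmem
    obtain ⟨k, hk, hIn, hO, hpos⟩ := hmem
    have h1 : (si : Int) = (tx : Int) + di + (k : Int) * di := by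
      have := congrArg Prod.fst hpos; simpa [pvPos] using this
    have h2 : (sj : Int) = (ty : Int) + dj + (k : Int) * dj := by
      have := congrArg Prod.snd hpos; simpa [pvPos] using this
    have key : ∀ j : Nat, j < k → pvPos ((si : Int) + ei) ((sj : Int) + ej) ei ej j
        = pvPos ((tx : Int) + di) ((ty : Int) + dj) di dj (k - j - 1) := by
      intro j hj
      have hc : ((k - j - 1 : Nat) : Int) = (k : Int) - (j : Int) - 1 := by omega
      unfold pvPos
      rw [Prod.mk.injEq, hc]
      constructor
      · linear_combination h1 + ((j : Int) + 1) * hie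
      · linear_combination h2 + ((j : Int) + 1) * hje
    have keyk : pvPos ((si : Int) + ei) ((sj : Int) + ej) ei ej k = ((tx : Int), (ty : Int)) := by
      unfold pvPos
      rw [Prod.mk.injEq]
      constructor
      · linear_combination h1 + ((k : Int) + 1) * hie
      · linear_combination h2 + ((k : Int) + 1) * hje
    refine ⟨k, hk, ?_, ?_, ?_⟩
    · intro j hj
      rcases Nat.lt_or_ge j k with hlt | hge
      · rw [key j hlt]; exact hIn (k - j - 1) (by omega)
      · have : j = k := by omega
        subst this
        rw [keyk]
        exact ⟨by omega, by omega, by omega, by omega⟩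
    · intro j hj
      rw [key j hj]
      exact hO (k - j - 1) (by omega)
    · rw [keyk]
      simpa using hT
  · rintro ⟨m, hm, hIn, hO, hT⟩
    have hInm := hIn m le_rfl
    obtain ⟨q1, q2, q3, q4⟩ := hInm
    obtain ⟨tx, ty, ht1, ht2, hTt⟩ : ∃ tx ty : Nat,
        ((tx : Nat) : Int) = (si : Int) + ei + (m : Int) * ei ∧
        ((ty : Nat) : Int) = (sj : Int) + ej + (m : Int) * ej ∧ C tx ty = "T" :=
      ⟨(pvPos ((si : Int) + ei) ((sj : Int) + ej) ei ej m).1.toNat,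
       (pvPos ((si : Int) + ei) ((sj : Int) + ej) ei ej m).2.toNat,
       Int.toNat_of_nonneg q1, Int.toNat_of_nonneg q2, hT⟩
    have q3' : (si : Int) + ei + (m : Int) * ei < (n : Int) := q3
    have q4' : (sj : Int) + ej + (m : Int) * ej < (n : Int) := q4
    have htxn : tx < n := by rw [← ht1] at q3'; exact_mod_cast q3'
    have htyn : ty < n := by rw [← ht2] at q4'; exact_mod_cast q4'
    have key' : ∀ j : Nat, j < m → pvPos ((tx : Int) + di) ((ty : Int) + dj) di dj j
        = pvPos ((si : Int) + ei) ((sj : Int) + ej) ei ej (m - j - 1) := by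
      intro j hj
      have hc : ((m - j - 1 : Nat) : Int) = (m : Int) - (j : Int) - 1 := by omega
      unfold pvPos
      rw [Prod.mk.injEq, hc]
      constructor
      · linear_combination ht1 + ((j : Int) + 1) * hie
      · linear_combination ht2 + ((j : Int) + 1) * hje
    have keym : pvPos ((tx : Int) + di) ((ty : Int) + dj) di dj m
        = ((si : Int), (sj : Int)) := by
      unfold pvPos
      rw [Prod.mk.injEq]
      constructor
      · linear_combination ht1 + ((m : Int) + 1) * hie
      · linear_combination ht2 + ((m : Int) + 1) * hje
    refine ⟨(tx, ty), htxn, htyn, hTt, ?_⟩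
    show (si, sj) ∈ pvVis C n di dj n ((tx : Int) + di) ((ty : Int) + dj)
    rw [pvVis_mem_iff]
    refine ⟨m, hm, ?_, ?_, ?_⟩
    · intro j hj
      rcases Nat.lt_or_ge j m with hlt | hge
      · rw [key' j hlt]; exact hIn (m - j - 1) (by omega)
      · have : j = m := by omega
        subst this
        rw [keym]
        exact ⟨by omega, by omega, by omega, by omega⟩
    · intro j hj
      rcases Nat.lt_or_ge j m with hlt | hge
      · rw [key' j hlt]
        exact hO (m - j - 1) (by omega)
      · have : j = m := by omega
        subst this
        rw [keym]
        simpa using hs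
    · exact keym.symm

-- a student cell is visited by some teacher ray iff one of B's four walks meets a teacher
lemma pvCovered (C : Nat → Nat → String) (n : Nat) (si sj : Nat) (hsi : si < n) (hsj : sj < n)
    (hs : C si sj = "S") :
    ((si, sj) ∈ pvAll C n ↔
      pvDirsB.any (fun d => pvHit C n d.1 d.2 n ((si : Int) + d.1) ((sj : Int) + d.2)) = true) := by
  have hs' : C si sj ≠ "O" := by rw [hs]; intro h; simp at h
  have hL : (si, sj) ∈ pvAll C n ↔ ∃ d ∈ pvDirsB, ∃ t : Nat × Nat,
      t.1 < n ∧ t.2 < n ∧ C t.1 t.2 = "T" ∧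
      (si, sj) ∈ pvVis C n d.1 d.2 n ((t.1 : Int) + d.1) ((t.2 : Int) + d.2) := by
    unfold pvAll
    rw [List.mem_flatMap]
    constructor
    · rintro ⟨t, ht, hmem⟩
      rw [List.mem_flatMap] at hmem
      obtain ⟨d, hd, hmem⟩ := hmem
      unfold pvTeach at ht
      have := (pvScanC C n "T" t).1 ht
      exact ⟨d, hd, t, this.1, this.2.1, this.2.2, hmem⟩
    · rintro ⟨d, hd, t, h1, h2, h3, hmem⟩
      refine ⟨t, ?_, ?_⟩
      · unfold pvTeach
        exact (pvScanC C n "T" t).2 ⟨h1, h2, h3⟩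
      · rw [List.mem_flatMap]
        exact ⟨d, hd, hmem⟩
  rw [hL, List.any_eq_true]
  have b1 := pvBridge C n 0 1 0 (-1) (by norm_num) (by norm_num) si sj hsi hsj hs'
  have b2 := pvBridge C n 0 (-1) 0 1 (by norm_num) (by norm_num) si sj hsi hsj hs'
  have b3 := pvBridge C n 1 0 (-1) 0 (by norm_num) (by norm_num) si sj hsi hsj hs'
  have b4 := pvBridge C n (-1) 0 1 0 (by norm_num) (by norm_num) si sj hsi hsj hs'
  constructor
  · rintro ⟨d, hd, hE⟩
    have hd' : d = ((0 : Int), (1 : Int)) ∨ d = (0, -1) ∨ d = (1, 0) ∨ d = (-1, 0) := by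
      simpa [pvDirsB] using hd
    rcases hd' with rfl | rfl | rfl | rfl
    · exact ⟨(0, -1), by simp [pvDirsB], b1.1 hE⟩
    · exact ⟨(0, 1), by simp [pvDirsB], b2.1 hE⟩
    · exact ⟨(-1, 0), by simp [pvDirsB], b3.1 hE⟩
    · exact ⟨(1, 0), by simp [pvDirsB], b4.1 hE⟩
  · rintro ⟨d, hd, hH⟩
    have hd' : d = ((0 : Int), (1 : Int)) ∨ d = (0, -1) ∨ d = (1, 0) ∨ d = (-1, 0) := by
      simpa [pvDirsB] using hd
    rcases hd' with rfl | rfl | rfl | rfl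
    · exact ⟨(0, -1), by simp [pvDirsB], b2.2 hH⟩
    · exact ⟨(0, 1), by simp [pvDirsB], b1.2 hH⟩
    · exact ⟨(-1, 0), by simp [pvDirsB], b4.2 hH⟩
    · exact ⟨(1, 0), by simp [pvDirsB], b3.2 hH⟩

-- B's cell function agrees with data on any value other than "O" and "X"
lemma pvCellB_eqv (data : List (List String)) (n : Nat)
    (c : (Nat × Nat) × (Nat × Nat) × (Nat × Nat)) (hc : pvGood data n c) (a b : Nat)
    (v : String) (hvO : ¬ ("O" = v)) (hvX : ¬ ("X" = v)) :
    (pvCellB data c a b = v ↔ pvGet2 data a b = v) := by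
  unfold pvCellB
  split_ifs with h
  · constructor
    · intro hh; exact absurd hh hvO
    · intro hh
      exfalso
      rcases h with h | h | h
      · have hx : pvGet2 data c.1.1 c.1.2 = "X" := hc.1.2.2
        rw [← h] at hx
        exact hvX (hx.symm.trans hh)
      · have hx : pvGet2 data c.2.1.1 c.2.1.2 = "X" := hc.2.1.2.2
        rw [← h] at hx
        exact hvX (hx.symm.trans hh)
      · have hx : pvGet2 data c.2.2.1 c.2.2.2 = "X" := hc.2.2.2.2
        rw [← h] at hx
        exact hvX (hx.symm.trans hh)
  · exact Iff.rfl

-- per-placement equivalence: bfs counts zero missed students iff every student is seen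
lemma pvCombo_iff (data : List (List String)) (n : Nat)
    (c : (Nat × Nat) × (Nat × Nat) × (Nat × Nat)) (hc : pvGood data n c) :
    (pvBfs (pvPlace data n c) = 0 ↔
      (pvScan data n "S").all (fun s => pvSeen data c n s) = true) := by
  have hg := pvDims_place data n c
  have hCg : ∀ a b, a < n → b < n → pvGet2 (pvPlace data n c) a b = pvCellB data c a b :=
    fun a b ha hb => pvGet2_place data n c hc a b ha hb
  rw [pvBfs_char n (pvCellB data c) _ hg hCg, List.all_eq_true]
  have hseen : ∀ s : Nat × Nat, pvSeen data c n s = pvDirsB.any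
      (fun d => pvHit (pvCellB data c) n d.1 d.2 n ((s.1 : Int) + d.1) ((s.2 : Int) + d.2)) := by
    intro s
    unfold pvSeen
    congr 1
    funext d
    exact pvSeenDir_eq data c n d.1 d.2 n _ _
  constructor
  · intro h s hsmem
    obtain ⟨h1, h2, h3⟩ := (pvScan_mem data n "S" s).1 hsmem
    have hCS : pvCellB data c s.1 s.2 = "S" :=
      (pvCellB_eqv data n c hc s.1 s.2 "S" (by intro hh; simp at hh) (by intro hh; simp at hh)).2 h3
    rw [hseen s, ← pvCovered (pvCellB data c) n s.1 s.2 h1 h2 hCS]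
    have : ((s.1, s.2) : Nat × Nat) = s := rfl
    rw [this]
    exact h s.1 s.2 h1 h2 hCS
  · intro h a b ha hb hCS
    have h3 : pvGet2 data a b = "S" :=
      (pvCellB_eqv data n c hc a b "S" (by intro hh; simp at hh) (by intro hh; simp at hh)).1 hCS
    have hsmem : (a, b) ∈ pvScan data n "S" := (pvScan_mem data n "S" (a, b)).2 ⟨ha, hb, h3⟩
    have hx := h (a, b) hsmem
    rw [hseen (a, b)] at hx
    exact (pvCovered (pvCellB data c) n a b ha hb hCS).2 hx

-- combination membership
lemma pvMem_combos2 {α : Type} : ∀ (l : List α) (p : α × α),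
    p ∈ pvCombos2 l → p.1 ∈ l ∧ p.2 ∈ l := by
  intro l
  induction l with
  | nil => intro p hp; simp [pvCombos2] at hp
  | cons x xs ih =>
    intro p hp
    rw [pvCombos2, List.mem_append] at hp
    rcases hp with hp | hp
    · rw [List.mem_map] at hp
      obtain ⟨y, hy, rfl⟩ := hp
      exact ⟨by simp, by simp [hy]⟩
    · exact ⟨by simp [(ih p hp).1], by simp [(ih p hp).2]⟩

lemma pvMem_combos3 {α : Type} : ∀ (l : List α) (c : α × α × α),
    c ∈ pvCombos3 l → c.1 ∈ l ∧ c.2.1 ∈ l ∧ c.2.2 ∈ l := by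
  intro l
  induction l with
  | nil => intro c hc; simp [pvCombos3] at hc
  | cons x xs ih =>
    intro c hc
    rw [pvCombos3, List.mem_append] at hc
    rcases hc with hc | hc
    · rw [List.mem_map] at hc
      obtain ⟨p, hp, rfl⟩ := hc
      have := pvMem_combos2 xs p hp
      exact ⟨by simp, by simp [this.1], by simp [this.2]⟩
    · have := ih c hc
      exact ⟨by simp [this.1], by simp [this.2.1], by simp [this.2.2]⟩

-- the two search loops agree placement by placement
lemma pvLoop_eq (data : List (List String)) (n : Nat) :
    ∀ combos, (∀ c ∈ combos, pvGood data n c) →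
      pvLoopA data n combos = pvLoopB data n (pvScan data n "S") combos := by
  intro combos
  induction combos with
  | nil => intro _; rfl
  | cons c rest ih =>
    intro h
    rw [pvLoopA, pvLoopB]
    have hiff := pvCombo_iff data n c (h c (by simp))
    by_cases hb : pvBfs (pvPlace data n c) = 0
    · rw [if_pos hb, if_pos (hiff.1 hb)]
    · rw [if_neg hb, if_neg (fun hh => hb (hiff.2 hh)), ih (fun c' hc' => h c' (by simp [hc']))]

-- ===== VERDICT (by name: the statement is the Claim_ definition above) =====
theorem check_main_spec : Claim_equal_check_main := by
  intro data _ _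
  unfold Spec_check_main
  simp only [check_main, check_main_alt]
  refine pvLoop_eq data data.length (pvCombos3 (pvScan data data.length "X")) ?_
  intro c hc
  obtain ⟨h1, h2, h3⟩ := pvMem_combos3 _ c hc
  exact ⟨(pvScan_mem _ _ _ _).1 h1, (pvScan_mem _ _ _ _).1 h2, (pvScan_mem _ _ _ _).1 h3⟩
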